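-- pv_equiv track=rewrite | github.com/antrozoidae/vpr | school_exam_printer/core/calculation.py | distribute_copies
-- ===== SOURCE A (Python) =====
-- from typing import List, Dict, Any, Tuple
--
-- def distribute_copies(copies: int, printers: List[str]) -> List[Tuple[str, int]]:
--     """
--     Распределить копии между принтерами равномерно.
--     Остаток распределяется последовательно на первые N принтеров.
--     """
--     if not printers:
--         return []
--
--     base_copies = copies // len(printers)
--     remainder = copies % len(printers)
--
--     distribution = []
--     for i, printer in enumerate(printers):
--         printer_copies = base_copies + (1 if i < remainder else 0)
--         if printer_copies > 0:
--             distribution.append((printer, printer_copies))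
--
--     return distribution
-- ===== SOURCE B (Python) =====
-- def distribute_copies(copies, printers):
--     """Greedy peel: each printer in turn takes the ceiling share of what is
--     still to be distributed over the printers not yet served."""
--     distribution = []
--     remaining = copies
--     left = len(printers)
--     for printer in printers:
--         share = -(-remaining // left)  # ceil(remaining / left)
--         if share > 0:
--             distribution.append((printer, share))
--         remaining -= share
--         left -= 1
--     return distribution
-- ===== Notes on version B (the rewrite author's own statement) =====
-- stated objective: alternative
-- what changed: Replaces the closed-form base//remainder precomputation and enumerate-indexed comparison with a single greedy peel: each printer takes the ceiling of remaining/left, and remaining/left shrink as the list is traversed.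
import Mathlib
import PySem

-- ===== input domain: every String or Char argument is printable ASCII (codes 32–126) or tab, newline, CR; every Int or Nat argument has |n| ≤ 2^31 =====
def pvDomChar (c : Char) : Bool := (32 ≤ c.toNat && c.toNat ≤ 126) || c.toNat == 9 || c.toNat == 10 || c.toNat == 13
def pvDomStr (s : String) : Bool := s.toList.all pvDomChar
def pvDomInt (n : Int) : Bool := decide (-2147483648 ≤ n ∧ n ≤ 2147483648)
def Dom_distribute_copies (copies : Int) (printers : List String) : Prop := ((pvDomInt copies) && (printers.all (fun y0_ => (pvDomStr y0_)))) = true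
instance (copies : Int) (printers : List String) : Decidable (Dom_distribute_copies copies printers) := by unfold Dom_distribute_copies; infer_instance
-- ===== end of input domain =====

-- B differs from A only in decomposition (greedy ceiling peel vs closed-form base/remainder); same values everywhere, no speed claim.

-- ===== PORT A =====
def distribute_copies (copies : Int) (printers : List String) : List (String × Int) :=
  if printers = [] then []
  else
    let base_copies := PySem.Int.floordiv copies (printers.length : Int)
    let remainder := PySem.Int.mod copies (printers.length : Int)
    (PySem.List.enumerate printers).foldl
      (fun distribution x =>
        let printer_copies := base_copies + (if x.1 < remainder then 1 else 0)
        if printer_copies > 0 then distribution ++ [(x.2, printer_copies)] else distribution)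
      []

-- ===== PORT B =====
def distribute_copies_alt (copies : Int) (printers : List String) : List (String × Int) :=
  (printers.foldl
    (fun (st : List (String × Int) × Int × Int) printer =>
      let share := -(PySem.Int.floordiv (-st.2.1) st.2.2)   -- ceil(remaining / left)
      ((if share > 0 then st.1 ++ [(printer, share)] else st.1), st.2.1 - share, st.2.2 - 1))
    ([], copies, (printers.length : Int))).1

-- ===== PRECONDITION & SPEC =====
def Spec_distribute_copies (copies : Int) (printers : List String) (out : List (String × Int)) : Prop := out = distribute_copies_alt copies printers
instance (copies : Int) (printers : List String) (out : List (String × Int)) : Decidable (Spec_distribute_copies copies printers out) := by unfold Spec_distribute_copies; infer_instance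

-- ===== CLAIM (what is proved, stated in full; the proofs are below) =====
def Claim_equal_distribute_copies : Prop := ∀ (copies : Int) (printers : List String), Dom_distribute_copies copies printers → Spec_distribute_copies copies printers (distribute_copies copies printers)

-- ===== LEMMAS AND PROOFS =====

-- proof-only recursion: B's loop without the accumulator/state packaging
def gB : Int → List String → List (String × Int)
  | _, [] => []
  | r, p :: ps =>
    let s := -(PySem.Int.floordiv (-r) ((ps.length : Int) + 1))
    (if s > 0 then [(p, s)] else []) ++ gB (r - s) ps

-- proof-only recursion: A's loop with the index replaced by a decreasing remainder counter
def hA : Int → Int → List String → List (String × Int)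
  | _, _, [] => []
  | b, r, p :: ps =>
    (if 0 < b + (if 0 < r then 1 else 0) then [(p, b + (if 0 < r then 1 else 0))] else [])
      ++ hA b (r - 1) ps

theorem bfold (ps : List String) (r : Int) (acc : List (String × Int)) :
    (ps.foldl
      (fun (st : List (String × Int) × Int × Int) printer =>
        let share := -(PySem.Int.floordiv (-st.2.1) st.2.2)
        ((if share > 0 then st.1 ++ [(printer, share)] else st.1), st.2.1 - share, st.2.2 - 1))
      (acc, r, (ps.length : Int))).1 = acc ++ gB r ps := by
  induction ps generalizing r acc with
  | nil => simp [gB]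
  | cons p ps ih =>
    simp only [List.foldl, gB, List.length_cons]
    have hlen : ((ps.length + 1 : Nat) : Int) - 1 = (ps.length : Int) := by push_cast; ring
    have hlen2 : ((ps.length + 1 : Nat) : Int) = (ps.length : Int) + 1 := by push_cast; ring
    rw [hlen2]
    set s := -(PySem.Int.floordiv (-r) ((ps.length : Int) + 1)) with hs
    by_cases h : s > 0 <;> simp only [h, if_pos, if_neg, not_false_iff] <;>
      rw [show ((ps.length : Int) + 1) - 1 = (ps.length : Int) by ring, ih] <;> simp

theorem afold (ps : List String) (s b rem : Int) (acc : List (String × Int)) :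
    ((PySem.List.enumerate ps s).foldl
      (fun distribution x =>
        let printer_copies := b + (if x.1 < rem then 1 else 0)
        if printer_copies > 0 then distribution ++ [(x.2, printer_copies)] else distribution)
      acc) = acc ++ hA b (rem - s) ps := by
  induction ps generalizing s acc with
  | nil => simp [PySem.List.enumerate_nil, hA]
  | cons p ps ih =>
    rw [PySem.List.enumerate_cons]
    simp only [List.foldl, hA]
    have h1 : (s < rem) ↔ (0 < rem - s) := by omega
    have h2 : rem - (s + 1) = (rem - s) - 1 := by ring
    simp only [h1]
    by_cases h : 0 < b + (if 0 < rem - s then 1 else 0) <;>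
      simp only [h, gt_iff_lt, if_pos, if_neg, not_false_iff] <;>
      rw [ih, h2] <;> simp

theorem hA_nonpos (ps : List String) (b r r' : Int) (hr : r ≤ 0) (hr' : r' ≤ 0) :
    hA b r ps = hA b r' ps := by
  induction ps generalizing r r' with
  | nil => rfl
  | cons p ps ih =>
    simp only [hA, if_neg (show ¬ (0:Int) < r by omega), if_neg (show ¬ (0:Int) < r' by omega)]
    rw [ih (r - 1) (r' - 1) (by omega) (by omega)]

theorem hA_eq_gB (ps : List String) (c : Int) (hne : ps ≠ []) :
    hA (PySem.Int.floordiv c (ps.length : Int)) (PySem.Int.mod c (ps.length : Int)) ps = gB c ps := by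
  induction ps generalizing c with
  | nil => exact absurd rfl hne
  | cons p ps ih =>
    have hlen : (((p :: ps).length) : Int) = (ps.length : Int) + 1 := by simp
    rw [hlen]
    have hn : (0:Int) < (ps.length : Int) + 1 := by omega
    obtain ⟨b, hb⟩ : ∃ b, PySem.Int.floordiv c ((ps.length : Int) + 1) = b := ⟨_, rfl⟩
    obtain ⟨r, hr⟩ : ∃ r, PySem.Int.mod c ((ps.length : Int) + 1) = r := ⟨_, rfl⟩
    have hbm : b * ((ps.length : Int) + 1) + r = c := by
      rw [← hb, ← hr]; exact PySem.Int.floordiv_mul_add_mod c _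
    have hr0 : (0:Int) ≤ r := hr ▸ PySem.Int.mod_nonneg c hn
    have hrn : r < (ps.length : Int) + 1 := hr ▸ PySem.Int.mod_lt c hn
    -- the head share taken by B equals A's base + extra
    have hceil : -(PySem.Int.floordiv (-c) ((ps.length : Int) + 1)) = b + (if 0 < r then 1 else 0) := by
      rw [PySem.Int.neg_floordiv_neg_eq_iff_of_pos hn]
      by_cases h : 0 < r <;> simp only [h, ite_true, ite_false] <;> constructor <;> nlinarith
    simp only [hA, gB, hb, hr, hceil, gt_iff_lt]
    congr 1
    rcases ps with _ | ⟨q, qs⟩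
    · simp [hA, gB]
    · have hm0 : (0:Int) < ((q :: qs).length : Int) := by simp
      rw [← ih (c - (b + if 0 < r then 1 else 0)) (by simp)]
      by_cases h : 0 < r
      · -- remainder positive: the tail sees the same base and remainder r - 1
        simp only [h, ite_true] at hbm ⊢
        have hfd : PySem.Int.floordiv (c - (b + 1)) ((q :: qs).length : Int) = b := by
          rw [PySem.Int.floordiv_eq_iff_of_pos hm0]
          constructor <;> nlinarith
        have h2 := PySem.Int.floordiv_mul_add_mod (c - (b + 1)) ((q :: qs).length : Int)
        rw [hfd] at h2
        have hmd : PySem.Int.mod (c - (b + 1)) ((q :: qs).length : Int) = r - 1 := by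
          linear_combination h2 - hbm
        rw [hfd, hmd]
      · -- remainder zero: both remainder counters stay nonpositive
        have hre : r = 0 := by omega
        simp only [h, ite_false, add_zero] at hbm ⊢
        have hfd : PySem.Int.floordiv (c - b) ((q :: qs).length : Int) = b := by
          rw [PySem.Int.floordiv_eq_iff_of_pos hm0]
          constructor <;> nlinarith
        have h2 := PySem.Int.floordiv_mul_add_mod (c - b) ((q :: qs).length : Int)
        rw [hfd] at h2
        have hmd : PySem.Int.mod (c - b) ((q :: qs).length : Int) = 0 := by
          linear_combination h2 - hbm + hre
        rw [hfd, hmd]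
        exact hA_nonpos _ _ _ _ (by omega) le_rfl

-- ===== VERDICT (by name: the statement is the Claim_ definition above) =====
theorem distribute_copies_spec : Claim_equal_distribute_copies := by
  intro copies printers _
  unfold Spec_distribute_copies distribute_copies distribute_copies_alt
  by_cases h : printers = []
  · subst h; simp
  · rw [if_neg h, bfold, afold, List.nil_append, List.nil_append, sub_zero,
      hA_eq_gB printers copies h]
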